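-- pv_equiv track=rewrite | github.com/Drplana/OSeMOSYS-pyomo | OSeMOSYS/SolveSolutions.py | generate_dependency_dict
-- ===== SOURCE A (Python) =====
-- def generate_dependency_dict(variable_dependencies):
--     """
--     Genera un diccionario estructurado donde las claves son las dependencias formateadas
--     y los valores son listas de variables que tienen esa dependencia.
--
--     Args:
--         variable_dependencies (dict): Diccionario con las variables y sus dependencias en formato original.
--
--     Returns:
--         dict: Diccionario estructurado con dependencias formateadas como claves y listas de variables como valores.
--     """
--     formatted_dependencies = {}
--
--     for variable, dependency_list in variable_dependencies.items():
--         # Formatear la dependencia (reemplazar '*' por ',' y envolver cada elemento entre comillas simples)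
--         for dependency in dependency_list:
--             formatted_dependency = "['" + dependency.replace("*", "','") + "']"
--
--             # Agregar la variable al diccionario estructurado
--             if formatted_dependency not in formatted_dependencies:
--                 formatted_dependencies[formatted_dependency] = []
--             formatted_dependencies[formatted_dependency].append(variable)
--
--     return formatted_dependencies
-- ===== SOURCE B (Python) =====
-- def generate_dependency_dict(variable_dependencies):
--     pairs = [("['" + dependency.replace("*", "','") + "']", variable)
--              for variable, dependency_list in variable_dependencies.items()
--              for dependency in dependency_list]
--     keys = dict.fromkeys(key for key, _ in pairs)
--     return {key: [variable for k, variable in pairs if k == key] for key in keys}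
-- ===== Notes on version B (the rewrite author's own statement) =====
-- stated objective: alternative
-- what changed: Replaces A's incremental dict aggregation (membership test + append inside the loop) by a flatten-then-group pass: build the flat (formatted_key, variable) pair list, take the keys in first-occurrence order with dict.fromkeys, and build each group with one comprehension per key.
import Mathlib
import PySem

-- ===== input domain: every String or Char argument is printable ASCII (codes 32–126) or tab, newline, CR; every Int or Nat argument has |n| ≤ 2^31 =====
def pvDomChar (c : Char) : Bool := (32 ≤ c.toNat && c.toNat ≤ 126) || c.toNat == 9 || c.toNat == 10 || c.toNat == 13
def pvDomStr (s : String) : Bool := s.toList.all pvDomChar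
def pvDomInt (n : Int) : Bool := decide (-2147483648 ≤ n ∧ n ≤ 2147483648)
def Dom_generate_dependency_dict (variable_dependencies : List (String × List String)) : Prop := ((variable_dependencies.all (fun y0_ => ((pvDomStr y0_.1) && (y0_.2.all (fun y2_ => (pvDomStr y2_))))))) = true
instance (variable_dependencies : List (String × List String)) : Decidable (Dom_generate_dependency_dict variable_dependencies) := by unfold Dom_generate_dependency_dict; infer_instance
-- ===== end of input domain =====

-- B flattens to (formatted_key, variable) pairs, takes keys in first-occurrence order
-- with dict.fromkeys, and builds each group by one comprehension per key
-- (alternative decomposition, same result including key and value order).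

-- ===== PORT A =====
-- formatted = "['" + dependency.replace("*", "','") + "']"
def pvFmt (dependency : String) : String :=
  "['" ++ PySem.Str.replace dependency "*" "','" ++ "']"

def generate_dependency_dict (variable_dependencies : List (String × List String)) : List (String × List String) :=
  (variable_dependencies.foldl
    (fun formatted_dependencies vd =>
      vd.2.foldl
        (fun formatted_dependencies dependency =>
          let formatted_dependency := pvFmt dependency
          let formatted_dependencies :=
            if formatted_dependencies.contains formatted_dependency then formatted_dependencies
            else formatted_dependencies.insert formatted_dependency []
          formatted_dependencies.modify formatted_dependency [] (fun vs => vs ++ [vd.1]))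
        formatted_dependencies)
    (PySem.Dict.empty : PySem.Dict String (List String))).items

-- ===== PORT B =====
-- pairs = [(fmt(dep), var) for var, deps in ….items() for dep in deps]
def pvPairs (variable_dependencies : List (String × List String)) : List (String × String) :=
  variable_dependencies.flatMap (fun vd => vd.2.map (fun dependency => (pvFmt dependency, vd.1)))

-- keys = dict.fromkeys(…)  (ordered dedup = PySem.List.dedup);  then one comprehension per key
def generate_dependency_dict_alt (variable_dependencies : List (String × List String)) : List (String × List String) :=
  let pairs := pvPairs variable_dependencies
  let keys := PySem.List.dedup (pairs.map Prod.fst)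
  keys.map (fun key => (key, (pairs.filter (fun p => p.1 == key)).map (·.2)))

-- ===== PRECONDITION & SPEC =====
def Spec_generate_dependency_dict (variable_dependencies : List (String × List String)) (out : List (String × List String)) : Prop := out = generate_dependency_dict_alt variable_dependencies
instance (variable_dependencies : List (String × List String)) (out : List (String × List String)) : Decidable (Spec_generate_dependency_dict variable_dependencies out) := by unfold Spec_generate_dependency_dict; infer_instance

-- ===== CLAIM (what is proved, stated in full; the proofs are below) =====
def Claim_equal_generate_dependency_dict : Prop := ∀ (variable_dependencies : List (String × List String)), Dom_generate_dependency_dict variable_dependencies → Spec_generate_dependency_dict variable_dependencies (generate_dependency_dict variable_dependencies)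

-- ===== LEMMAS AND PROOFS =====

-- proof-level grouping function: peel off the first key's whole group, recurse
def pvGroup : List (String × String) → List (String × List String)
  | [] => []
  | p :: rest =>
      (p.1, ((p :: rest).filter (fun q => q.1 == p.1)).map (·.2)) ::
        pvGroup ((p :: rest).filter (fun q => q.1 != p.1))
termination_by l => l.length
decreasing_by
  simp only [List.filter_cons, bne_self_eq_false, List.length_cons]
  exact Nat.lt_succ_of_le (List.length_filter_le _ _)

-- proof-level first-occurrence dedup in recursive form
def pvRecFirst : List String → List String
  | [] => []
  | k :: ks => k :: pvRecFirst ((k :: ks).filter (fun x => x != k))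
termination_by l => l.length
decreasing_by
  simp only [List.filter_cons, bne_self_eq_false, List.length_cons]
  exact Nat.lt_succ_of_le (List.length_filter_le _ _)

-- A's inner-loop body as a step over a (key, variable) pair
def pvStep (d : PySem.Dict String (List String)) (p : String × String) : PySem.Dict String (List String) :=
  (if d.contains p.1 then d else d.insert p.1 []).modify p.1 [] (fun vs => vs ++ [p.2])

lemma pvGroup_cons (p : String × String) (rest : List (String × String)) :
    pvGroup (p :: rest) =
      (p.1, ((p :: rest).filter (fun q => q.1 == p.1)).map (·.2)) ::
        pvGroup ((p :: rest).filter (fun q => q.1 != p.1)) := by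
  rw [pvGroup]

lemma pvRecFirst_cons (k : String) (ks : List String) :
    pvRecFirst (k :: ks) = k :: pvRecFirst (ks.filter (fun x => x != k)) := by
  rw [pvRecFirst]
  simp

lemma mem_pvRecFirst {x : String} : ∀ {l : List String}, x ∈ pvRecFirst l → x ∈ l := by
  intro l
  induction l using pvRecFirst.induct with
  | case1 => intro h; simp [pvRecFirst] at h
  | case2 k ks ih =>
      rw [pvRecFirst]
      intro h
      rcases List.mem_cons.mp h with h | h
      · simp [h]
      · exact List.mem_of_mem_filter (ih h)

-- foldl of Set.add = append the fresh elements' first-occurrence dedup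
lemma foldl_add_recFirst : ∀ (ks : List String) (s : PySem.Set String),
    ks.foldl PySem.Set.add s = s ++ pvRecFirst (ks.filter (fun x => !s.contains x)) := by
  intro ks
  induction ks with
  | nil => intro s; simp [pvRecFirst]
  | cons k ks ih =>
      intro s
      rw [List.foldl_cons, ih]
      by_cases hc : s.contains k = true
      · have hk : k ∈ s := by simpa [PySem.Set.contains] using hc
        have hadd : PySem.Set.add s k = s := by
          simp [PySem.Set.add, PySem.Set.contains, hk]
        rw [hadd, List.filter_cons]
        simp [PySem.Set.contains, hk]
      · have hc' : s.contains k = false := by simpa using hc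
        have hk : k ∉ s := by simpa [PySem.Set.contains] using hc'
        have hadd : PySem.Set.add s k = s ++ [k] := by
          simp [PySem.Set.add, PySem.Set.contains, hk]
        rw [hadd, List.filter_cons]
        have hcond : (!s.contains k) = true := by rw [hc']; rfl
        rw [hcond, if_pos rfl, pvRecFirst_cons, List.filter_filter, List.append_assoc,
          List.singleton_append]
        congr 3
        apply List.filter_congr
        intro x _
        by_cases hxk : x = k <;> simp [PySem.Set.contains, hxk]

lemma dedup_eq_pvRecFirst (ks : List String) : PySem.List.dedup ks = pvRecFirst ks := by
  rw [PySem.List.dedup_eq_ofList, PySem.Set.ofList_eq_foldl, foldl_add_recFirst]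
  simp [PySem.Set.contains]

-- pvGroup = map-over-deduped-keys form
lemma pvGroup_eq_map : ∀ (pairs : List (String × String)),
    pvGroup pairs =
      (pvRecFirst (pairs.map Prod.fst)).map
        (fun key => (key, (pairs.filter (fun p => p.1 == key)).map (·.2))) := by
  intro pairs
  induction pairs using pvGroup.induct with
  | case1 => simp [pvGroup, pvRecFirst]
  | case2 p rest ih =>
      rw [pvGroup_cons, List.map_cons, pvRecFirst_cons, List.map_cons]
      congr 1
      have hmapfilter : (rest.map Prod.fst).filter (fun x => x != p.1)
          = ((p :: rest).filter (fun q => q.1 != p.1)).map Prod.fst := by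
        rw [List.filter_cons]
        simp only [bne_self_eq_false, Bool.false_eq_true, if_false, List.filter_map]
        rfl
      rw [hmapfilter, ih]
      apply List.map_congr_left
      intro k hk
      have hk' : k ∈ ((p :: rest).filter (fun q => q.1 != p.1)).map Prod.fst :=
        mem_pvRecFirst hk
      have hkp : k ≠ p.1 := by
        obtain ⟨q, hq, hqk⟩ := List.mem_map.mp hk'
        have := List.of_mem_filter hq
        intro h; rw [hqk, h] at this; simp at this
      congr 1
      congr 1
      rw [List.filter_cons, List.filter_cons]
      have hp1 : (p.1 == k) = false := by simpa using fun h => hkp h.symm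
      have hp2 : (p.1 != p.1) = false := by simp
      simp only [hp1, hp2, Bool.false_eq_true, if_false, List.filter_filter]
      apply List.filter_congr
      intro q _
      by_cases hqk : (q.1 == k) = true
      · have hq : q.1 = k := by simpa using hqk
        have : (q.1 != p.1) = true := by simp [hq, hkp]
        simp [hqk, this]
      · simp [hqk]

lemma pvStep_items (d : PySem.Dict String (List String)) (hnd : d.keys.Nodup) (k : String) (v : String) :
    (pvStep d (k, v)).items =
      if d.contains k then
        d.items.map (fun e => if e.1 == k then (e.1, e.2 ++ [v]) else e)
      else d.items ++ [(k, [v])] := by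
  by_cases hc : d.contains k = true
  · simp only [pvStep, hc, if_true, PySem.Dict.modify]
    rw [PySem.Dict.items_insert_of_contains _ _ hc]
    apply List.map_congr_left
    intro p hp
    by_cases hpk : (p.1 == k) = true
    · have hek : p.1 = k := by simpa using hpk
      have hget : d.getD p.1 [] = p.2 :=
        PySem.Dict.getD_of_mem_items d (by simpa using hp) hnd []
      simp [← hek, hget]
    · simp [hpk]
  · have hc' : d.contains k = false := by simpa using hc
    have hins : (d.insert k ([] : List String)).contains k = true :=
      PySem.Dict.contains_insert_self d k []
    simp only [pvStep, hc', if_false, Bool.false_eq_true, PySem.Dict.modify,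
      PySem.Dict.getD_insert_self]
    rw [PySem.Dict.items_insert_of_contains _ _ hins,
      PySem.Dict.items_insert_of_not_contains _ _ hc']
    have hnk : ∀ p ∈ d.items, (p.1 == k) = false := by
      have := hc'
      simp only [PySem.Dict.contains, List.any_eq_false] at this
      intro p hp; simpa using this p hp
    rw [List.map_append]
    congr 1
    · apply (List.map_congr_left _).trans (List.map_id _)
      intro p hp; simp [hnk p hp]
    · simp

lemma pvStep_contains (d : PySem.Dict String (List String)) (hnd : d.keys.Nodup)
    (k v x : String) : (pvStep d (k, v)).contains x = (d.contains x || x == k) := by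
  simp only [PySem.Dict.contains]
  rw [show (pvStep d (k, v)).items.any (fun p => p.1 == x)
        = ((pvStep d (k, v)).items.map Prod.fst).any (fun y => y == x) by
      simp [List.any_map, Function.comp_def]]
  rw [pvStep_items d hnd k v]
  by_cases hc : d.contains k = true
  · simp only [hc, if_true]
    have hfst : ((d.items.map (fun e => if e.1 == k then (e.1, e.2 ++ [v]) else e)).map Prod.fst)
        = d.items.map Prod.fst := by
      rw [List.map_map]
      apply List.map_congr_left
      intro p _; by_cases hpk : p.1 = k <;> simp [hpk]
    rw [hfst]
    by_cases hx : (x == k) = true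
    · have : x = k := by simpa using hx
      subst this
      have : d.items.any (fun p => p.1 == x) = true := by
        simpa [PySem.Dict.contains] using hc
      simp [List.any_map, Function.comp_def, this]
    · simp [hx, List.any_map, Function.comp_def]
  · have hc' : d.contains k = false := by simpa using hc
    simp [hc', List.any_map, Function.comp_def, List.any_append, Bool.or_comm,
      BEq.comm (a := x) (b := k)]

lemma pvStep_keys_nodup (d : PySem.Dict String (List String)) (hnd : d.keys.Nodup)
    (k v : String) : (pvStep d (k, v)).keys.Nodup := by
  simp only [PySem.Dict.keys] at *
  rw [pvStep_items d hnd k v]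
  by_cases hc : d.contains k = true
  · simp only [hc, if_true]
    have hfst : ((d.items.map (fun e => if e.1 == k then (e.1, e.2 ++ [v]) else e)).map Prod.fst)
        = d.items.map Prod.fst := by
      rw [List.map_map]
      apply List.map_congr_left
      intro p _; by_cases hpk : p.1 = k <;> simp [hpk]
    rw [hfst]; exact hnd
  · have hc' : d.contains k = false := by simpa using hc
    have hkmem : k ∉ d.items.map Prod.fst := by
      intro hmem
      obtain ⟨p, hp, hpk⟩ := List.mem_map.mp hmem
      have : d.items.any (fun q => q.1 == k) = true :=
        List.any_eq_true.mpr ⟨p, hp, by simp [hpk]⟩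
      simp [PySem.Dict.contains, this] at hc'
    simp only [hc', Bool.false_eq_true, if_false, List.map_append, List.map_cons, List.map_nil]
    rw [List.nodup_append]
    refine ⟨hnd, List.nodup_singleton k, ?_⟩
    intro a ha b hb
    have hbk : b = k := by simpa using hb
    intro hab
    exact hkmem (by rw [← hbk, ← hab]; exact ha)

lemma mem_items_contains (d : PySem.Dict String (List String)) {e : String × List String}
    (he : e ∈ d.items) : d.contains e.1 = true := by
  simp only [PySem.Dict.contains]
  exact List.any_eq_true.mpr ⟨e, he, by simp⟩

-- the main invariant: folding A's step over a pair list, on items level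
lemma foldl_pvStep_items (pairs : List (String × String)) :
    ∀ d : PySem.Dict String (List String), d.keys.Nodup →
      (pairs.foldl pvStep d).items =
        d.items.map (fun e => (e.1, e.2 ++ (pairs.filter (fun q => q.1 == e.1)).map (·.2)))
          ++ pvGroup (pairs.filter (fun q => !(d.contains q.1))) := by
  induction pairs with
  | nil =>
      intro d _
      simp [pvGroup]
  | cons p rest ih =>
      intro d hnd
      obtain ⟨k, v⟩ := p
      rw [List.foldl_cons, ih (pvStep d (k, v)) (pvStep_keys_nodup d hnd k v)]
      rw [pvStep_items d hnd k v]
      by_cases hc : d.contains k = true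
      · simp only [hc, if_true]
        have hmap : (d.items.map (fun e => if e.1 == k then (e.1, e.2 ++ [v]) else e)).map
              (fun e => (e.1, e.2 ++ (rest.filter (fun q => q.1 == e.1)).map (·.2)))
            = d.items.map (fun e =>
                (e.1, e.2 ++ (((k, v) :: rest).filter (fun q => q.1 == e.1)).map (·.2))) := by
          rw [List.map_map]
          apply List.map_congr_left
          intro e _
          by_cases hek : (e.1 == k) = true
          · have h1 : e.1 = k := by simpa using hek
            simp [h1, List.append_assoc]
          · have h0 : (e.1 == k) = false := by simpa using hek
            have hne : e.1 ≠ k := by simpa using h0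
            have h1 : (k == e.1) = false := by
              simpa using fun h => hne h.symm
            simp [hne, h1]
        have hfilt : rest.filter (fun q => !((pvStep d (k, v)).contains q.1))
            = ((k, v) :: rest).filter (fun q => !(d.contains q.1)) := by
          rw [List.filter_cons]
          simp only [hc, Bool.not_true, Bool.false_eq_true, if_false]
          apply List.filter_congr
          intro q _
          rw [pvStep_contains d hnd k v q.1]
          by_cases hqk : (q.1 == k) = true
          · have : q.1 = k := by simpa using hqk
            simp [this, hc]
          · simp [hqk]
        rw [hmap, hfilt]
      · have hc' : d.contains k = false := by simpa using hc
        simp only [hc', Bool.false_eq_true, if_false]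
        rw [List.map_append]
        have hmap : d.items.map (fun e => (e.1, e.2 ++ (rest.filter (fun q => q.1 == e.1)).map (·.2)))
            = d.items.map (fun e =>
                (e.1, e.2 ++ (((k, v) :: rest).filter (fun q => q.1 == e.1)).map (·.2))) := by
          apply List.map_congr_left
          intro e he
          have hek : (k == e.1) = false := by
            by_contra h
            have hkek : (k == e.1) = true := by simpa using h
            have hke : k = e.1 := by simpa using hkek
            have hcc := mem_items_contains d he
            rw [← hke] at hcc
            simp [hcc] at hc'
          simp [hek]
        rw [hmap]
        have hfiltcons : ((k, v) :: rest).filter (fun q => !(d.contains q.1))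
            = (k, v) :: rest.filter (fun q => !(d.contains q.1)) := by
          simp [hc']
        rw [hfiltcons, pvGroup_cons]
        have hhead : (((k, v) :: rest.filter (fun q => !(d.contains q.1))).filter
              (fun q => q.1 == k)).map (·.2)
            = [v] ++ (rest.filter (fun q => q.1 == k)).map (·.2) := by
          rw [List.filter_cons]
          simp only [beq_self_eq_true, if_true, List.filter_filter, List.map_cons,
            List.singleton_append]
          congr 2
          apply List.filter_congr
          intro q _
          by_cases hqk : (q.1 == k) = true
          · have hq : q.1 = k := by simpa using hqk
            simp [hq, hc']
          · simp [hqk]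
        have htail : ((k, v) :: rest.filter (fun q => !(d.contains q.1))).filter
              (fun q => q.1 != k)
            = rest.filter (fun q => !((pvStep d (k, v)).contains q.1)) := by
          rw [List.filter_cons]
          simp only [bne_self_eq_false, Bool.false_eq_true, if_false]
          rw [List.filter_filter]
          apply List.filter_congr
          intro q _
          rw [pvStep_contains d hnd k v q.1]
          by_cases hqk : (q.1 == k) = true <;> simp [hqk, bne]
        rw [hhead, htail]
        simp [List.append_assoc]

-- A's nested fold equals the single fold of pvStep over the flattened pairs
lemma foldA_flat (l : List (String × List String)) :
    ∀ d : PySem.Dict String (List String),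
      l.foldl
        (fun formatted_dependencies vd =>
          vd.2.foldl
            (fun formatted_dependencies dependency =>
              pvStep formatted_dependencies (pvFmt dependency, vd.1))
            formatted_dependencies)
        d
      = (pvPairs l).foldl pvStep d := by
  induction l with
  | nil => intro d; simp [pvPairs]
  | cons e l ih =>
      intro d
      rw [List.foldl_cons]
      rw [ih]
      simp [pvPairs, List.foldl_append, List.foldl_map]

-- ===== VERDICT (by name: the statement is the Claim_ definition above) =====
theorem generate_dependency_dict_spec : Claim_equal_generate_dependency_dict := by
  intro vd _
  show generate_dependency_dict vd = generate_dependency_dict_alt vd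
  have h1 : generate_dependency_dict vd
      = ((pvPairs vd).foldl pvStep PySem.Dict.empty).items :=
    congrArg PySem.Dict.items (foldA_flat vd PySem.Dict.empty)
  rw [h1, foldl_pvStep_items (pvPairs vd) PySem.Dict.empty (by simp [PySem.Dict.keys, PySem.Dict.empty])]
  simp only [PySem.Dict.empty, PySem.Dict.contains, List.map_nil,
    List.any_nil, Bool.not_false, List.filter_true, List.nil_append]
  rw [pvGroup_eq_map]
  simp only [generate_dependency_dict_alt, dedup_eq_pvRecFirst]
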